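-- pv_equiv track=rewrite | github.com/onlyfeng/engram | scripts/ci/check_gateway_public_api_import_surface.py | _is_tier_b_module
-- ===== SOURCE A (Python) =====
-- from typing import List, Set
--
-- TIER_B_MODULES: Set[str] = {
--     "logbook_adapter",
--     "mcp_rpc",
--     "entrypoints",
-- }
--
-- TIER_B_SUBMODULE_PATHS: Set[str] = {
--     "entrypoints.tool_executor",
-- }
--
-- def _is_tier_b_module(module_name: str) -> bool:
--     """检查模块是否是 Tier B 模块（需要懒加载）"""
--     # 完全匹配
--     if module_name in TIER_B_MODULES:
--         return True
--     # 子模块路径匹配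
--     if module_name in TIER_B_SUBMODULE_PATHS:
--         return True
--     # 前缀匹配（例如 entrypoints.tool_executor）
--     for tier_b_mod in TIER_B_MODULES:
--         if module_name.startswith(tier_b_mod + "."):
--             return True
--     return False
-- ===== SOURCE B (Python) =====
-- from typing import Set
--
-- TIER_B_MODULES: Set[str] = {
--     "logbook_adapter",
--     "mcp_rpc",
--     "entrypoints",
-- }
--
-- TIER_B_SUBMODULE_PATHS: Set[str] = {
--     "entrypoints.tool_executor",
-- }
--
-- def _is_tier_b_module(module_name: str) -> bool:
--     """检查模块是否是 Tier B 模块（需要懒加载）"""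
--     # The base component covers both an exact match and any "base." prefix match.
--     head = module_name.partition('.')[0]
--     return head in TIER_B_MODULES or module_name in TIER_B_SUBMODULE_PATHS
-- ===== Notes on version B (the rewrite author's own statement) =====
-- stated objective: simpler
-- what changed: Replaces the exact-match check plus the startswith loop over TIER_B_MODULES by computing the base component once with partition('.') and doing a single set lookup on it (plus the retained submodule-path lookup).
import Mathlib
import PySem

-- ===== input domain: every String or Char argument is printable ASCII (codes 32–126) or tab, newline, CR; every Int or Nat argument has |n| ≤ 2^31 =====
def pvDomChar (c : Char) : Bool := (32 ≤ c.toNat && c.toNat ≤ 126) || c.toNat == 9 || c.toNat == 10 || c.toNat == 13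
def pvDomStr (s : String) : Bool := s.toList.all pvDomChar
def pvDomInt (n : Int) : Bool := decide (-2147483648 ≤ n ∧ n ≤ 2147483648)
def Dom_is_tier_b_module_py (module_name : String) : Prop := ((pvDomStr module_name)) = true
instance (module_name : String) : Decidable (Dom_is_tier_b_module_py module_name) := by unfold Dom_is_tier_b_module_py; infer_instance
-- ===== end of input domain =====

-- B computes the base component once (partition('.')) and replaces the exact-match
-- check plus the startswith loop by a single set lookup on it; return value only.

-- ===== PORT A =====
-- module-level set constants (order of iteration does not affect A's result: the
-- loop only asks whether SOME element is a prefix)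
def tierBModules : List (List Char) :=
  ["logbook_adapter".toList, "mcp_rpc".toList, "entrypoints".toList]

def tierBSubmodulePaths : List (List Char) :=
  ["entrypoints.tool_executor".toList]

def is_tier_b_module_py (module_name : String) : Bool :=
  let cs := module_name.toList
  -- 完全匹配
  if tierBModules.contains cs then true
  -- 子模块路径匹配
  else if tierBSubmodulePaths.contains cs then true
  -- 前缀匹配
  else tierBModules.any (fun m => PySem.Chars.startswith cs (m ++ ['.']))

-- ===== PORT B =====
def is_tier_b_module_py_alt (module_name : String) : Bool :=
  -- head = module_name.partition('.')[0] : exact — the characters before the first '.'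
  let head := module_name.toList.takeWhile (fun c => c != '.')
  tierBModules.contains head || tierBSubmodulePaths.contains module_name.toList

-- ===== PRECONDITION & SPEC =====
def Spec_is_tier_b_module_py (module_name : String) (out : Bool) : Prop := out = is_tier_b_module_py_alt module_name
instance (module_name : String) (out : Bool) : Decidable (Spec_is_tier_b_module_py module_name out) := by unfold Spec_is_tier_b_module_py; infer_instance

-- ===== CLAIM (what is proved, stated in full; the proofs are below) =====
def Claim_equal_is_tier_b_module_py : Prop := ∀ (module_name : String), Dom_is_tier_b_module_py module_name → Spec_is_tier_b_module_py module_name (is_tier_b_module_py module_name)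

-- ===== LEMMAS AND PROOFS =====

-- The head-lookup of B covers exactly A's exact-match-or-dot-prefix test, for a
-- dot-free candidate m.
lemma takeWhile_append_dot (m t : List Char) (hm : '.' ∉ m) :
    (m ++ '.' :: t).takeWhile (fun c => c != '.') = m := by
  induction m with
  | nil => simp
  | cons a m ih =>
    have ha : a ≠ '.' := by intro h; exact hm (h ▸ List.mem_cons_self)
    simp [ha, ih (fun h => hm (List.mem_cons_of_mem _ h))]

lemma key_lemma (m cs : List Char) (hm : '.' ∉ m) :
    (cs == m || PySem.Chars.startswith cs (m ++ ['.']))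
      = (cs.takeWhile (fun c => c != '.') == m) := by
  rcases h : cs.takeWhile (fun c => c != '.') == m with _ | _
  · -- RHS false: neither equal nor the dotted prefix
    simp only [beq_eq_false_iff_ne, ne_eq] at h
    have h1 : ¬ (cs = m) := by
      intro hc; subst hc
      exact h (List.takeWhile_eq_self_iff.mpr (by
        intro x hx; simp [bne_iff_ne]; intro he; exact hm (he ▸ hx)))
    have h2 : ¬ (PySem.Chars.startswith cs (m ++ ['.']) = true) := by
      rw [PySem.Chars.startswith_iff]
      rintro ⟨t, ht⟩
      have : cs = m ++ '.' :: t := by simpa using ht.symm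
      exact h (this ▸ takeWhile_append_dot m t hm)
    simp [h1, h2]
  · -- RHS true: cs = m ++ dropWhile, which is empty or starts with '.'
    simp only [beq_iff_eq] at h
    have hsplit : cs = m ++ cs.dropWhile (fun c => c != '.') := by
      conv_lhs => rw [← List.takeWhile_append_dropWhile (p := fun c => c != '.') (l := cs)]
      rw [h]
    rcases hd : cs.dropWhile (fun c => c != '.') with _ | ⟨c, t⟩
    · have : cs = m := by rw [hsplit, hd, List.append_nil]
      simp [this]
    · have hc : ¬ ((fun c => c != '.') c = true) := by
        have := List.head_dropWhile_not (p := fun c => c != '.') (l := cs) (by simp [hd])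
        simpa [hd] using this
      have hc' : c = '.' := by simpa [bne_iff_ne] using hc
      have : PySem.Chars.startswith cs (m ++ ['.']) = true := by
        rw [PySem.Chars.startswith_iff]
        exact ⟨t, by rw [hsplit, hd, hc']; simp⟩
      simp [this]

-- ===== VERDICT (by name: the statement is the Claim_ definition above) =====
theorem is_tier_b_module_py_spec : Claim_equal_is_tier_b_module_py := by
  intro s _
  unfold Spec_is_tier_b_module_py is_tier_b_module_py is_tier_b_module_py_alt
  simp only [tierBModules, tierBSubmodulePaths, List.contains_cons, List.contains_nil,
    List.any_cons, List.any_nil, Bool.or_false]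
  rw [← key_lemma "logbook_adapter".toList s.toList (by decide),
      ← key_lemma "mcp_rpc".toList s.toList (by decide),
      ← key_lemma "entrypoints".toList s.toList (by decide)]
  cases (s.toList == "logbook_adapter".toList) <;>
  cases (s.toList == "mcp_rpc".toList) <;>
  cases (s.toList == "entrypoints".toList) <;>
  cases (PySem.Chars.startswith s.toList ("logbook_adapter".toList ++ ['.'])) <;>
  cases (PySem.Chars.startswith s.toList ("mcp_rpc".toList ++ ['.'])) <;>
  cases (PySem.Chars.startswith s.toList ("entrypoints".toList ++ ['.'])) <;>
  cases (s.toList == "entrypoints.tool_executor".toList) <;>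
  simp
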